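-- pv_equiv track=rewrite | github.com/mykoabe/Competetive-Programming | All collections/1328-break-a-palindrome/1328-break-a-palindrome.py | breakPalindrome
-- ===== SOURCE A (Python) =====
-- def breakPalindrome(palindrome: str) -> str:
--     if len(palindrome) == 1:
--         return ""
--
--     s = list(palindrome)
--     for i in range(len(s)):
--         if s[i] != 'a':
--             s[i] = 'a'
--             break
--
--     if s != s[::-1]:
--         return "".join(s)
--
--     s = list(palindrome)
--     for i in range(len(s)-1, -1, -1):
--         if s[i] =="a":
--             s[i] = "b"
--             break
--
--     return "".join(s)
-- ===== SOURCE B (Python) =====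
-- def breakPalindrome(palindrome: str) -> str:
--     if len(palindrome) <= 1:
--         return ""
--     for i in range(len(palindrome) // 2):
--         if palindrome[i] != 'a':
--             return palindrome[:i] + 'a' + palindrome[i+1:]
--     return palindrome[:-1] + 'b'
-- ===== Notes on version B (the rewrite author's own statement) =====
-- stated objective: simpler
-- what changed: B replaces A's full scan + list reversal + palindrome recheck + second backward scan with a single half-length scan: the first non-'a' in the first half becomes 'a' (early return), otherwise the last character becomes 'b'.
-- outside the precondition, e.g. on breakPalindrome('ba'): A returns 'bb', B returns 'aa'; on breakPalindrome('aab'): A returns 'abb', B returns 'aab'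
import Mathlib
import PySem

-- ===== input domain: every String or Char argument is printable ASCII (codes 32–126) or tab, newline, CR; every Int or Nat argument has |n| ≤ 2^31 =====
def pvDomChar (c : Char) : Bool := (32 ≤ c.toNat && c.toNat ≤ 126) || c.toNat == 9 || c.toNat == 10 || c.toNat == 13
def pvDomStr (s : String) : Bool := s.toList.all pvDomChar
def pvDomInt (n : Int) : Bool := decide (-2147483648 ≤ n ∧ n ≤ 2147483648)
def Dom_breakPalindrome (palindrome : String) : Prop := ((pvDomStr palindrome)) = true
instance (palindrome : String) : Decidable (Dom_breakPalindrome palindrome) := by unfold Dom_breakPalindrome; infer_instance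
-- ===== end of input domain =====

-- B: one half-length scan (first non-'a' → 'a', early return; else last char → 'b') instead of
-- A's full scan + reversal + palindrome recheck + backward scan; equivalence is claimed on the
-- task's natural domain (palindrome inputs, Pre_).

-- ===== PORT A =====
-- first loop of A: scan left-to-right, set the first char ≠ 'a' to 'a', break
def pvFirstFix : List Char → List Char
  | [] => []
  | c :: cs => if c ≠ 'a' then 'a' :: cs else c :: pvFirstFix cs

-- second loop of A, ported over the reversed list: scanning from the end, set the first 'a' to 'b', break
def pvLastGo : List Char → List Char
  | [] => []
  | c :: cs => if c = 'a' then 'b' :: cs else c :: pvLastGo cs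

def breakPalindrome (palindrome : String) : String :=
  if palindrome.toList.length = 1 then "" else
  if pvFirstFix palindrome.toList ≠ (pvFirstFix palindrome.toList).reverse then
    String.ofList (pvFirstFix palindrome.toList)
  else
    String.ofList ((pvLastGo palindrome.toList.reverse).reverse)

-- ===== PORT B =====
-- B's half-length loop: scan the first k chars; the first char ≠ 'a' becomes 'a' (some = early return)
def pvAltScan : List Char → Nat → Option (List Char)
  | _, 0 => none
  | [], _ + 1 => none
  | c :: cs, k + 1 => if c ≠ 'a' then some ('a' :: cs) else (pvAltScan cs k).map (c :: ·)

def breakPalindrome_alt (palindrome : String) : String :=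
  if palindrome.toList.length ≤ 1 then "" else
  match pvAltScan palindrome.toList (palindrome.toList.length / 2) with
  | some s => String.ofList s
  | none => String.ofList (palindrome.toList.dropLast ++ ['b'])

-- ===== PRECONDITION & SPEC =====
-- Pre_ admits the task's guaranteed domain (palindrome inputs) plus all strings that have a
-- non-'a' in their first half and do not end in 'a' (there the two agree as well); it excludes
-- the remaining non-palindrome inputs, where A's fall-through value (after its palindrome
-- recheck of a non-palindrome input) is outside the task and B does the natural thing.
def Pre_breakPalindrome (palindrome : String) : Prop :=
  palindrome.toList.reverse = palindrome.toList ∨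
  (palindrome.toList.getLast? ≠ some 'a' ∧
    ∃ c ∈ palindrome.toList.take (palindrome.toList.length / 2), c ≠ 'a')
instance (palindrome : String) : Decidable (Pre_breakPalindrome palindrome) := by
  unfold Pre_breakPalindrome; infer_instance

def pvWitness_breakPalindrome : String := "aba"

def Spec_breakPalindrome (palindrome : String) (out : String) : Prop := out = breakPalindrome_alt palindrome
instance (palindrome : String) (out : String) : Decidable (Spec_breakPalindrome palindrome out) := by unfold Spec_breakPalindrome; infer_instance

-- ===== CLAIM (what is proved, stated in full; the proofs are below) =====
def Claim_equal_breakPalindrome : Prop := ∀ (palindrome : String), Dom_breakPalindrome palindrome → Pre_breakPalindrome palindrome → Spec_breakPalindrome palindrome (breakPalindrome palindrome)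

-- ===== LEMMAS AND PROOFS =====

-- pvFirstFix on an all-'a' list is the identity
theorem pvFirstFix_all_a (l : List Char) (h : ∀ c ∈ l, c = 'a') : pvFirstFix l = l := by
  induction l with
  | nil => rfl
  | cons c cs ih =>
      have hc : c = 'a' := h c (by simp)
      simp [pvFirstFix, hc, ih (fun x hx => h x (by simp [hx]))]

theorem pvFirstFix_split (u v : List Char) (c : Char)
    (hu : ∀ x ∈ u, x = 'a') (hc : c ≠ 'a') :
    pvFirstFix (u ++ c :: v) = u ++ 'a' :: v := by
  induction u with
  | nil => simp [pvFirstFix, hc]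
  | cons x xs ih =>
      have hx : x = 'a' := hu x (by simp)
      simp [pvFirstFix, hx, ih (fun y hy => hu y (by simp [hy]))]

theorem pvAltScan_none (l : List Char) (k : Nat)
    (h : ∀ c ∈ l.take k, c = 'a') : pvAltScan l k = none := by
  induction l generalizing k with
  | nil => cases k <;> rfl
  | cons c cs ih =>
      cases k with
      | zero => rfl
      | succ k =>
          have hc : c = 'a' := h c (by simp)
          simp [pvAltScan, hc, ih k (fun x hx => h x (by simp [hx]))]

theorem pvAltScan_split (u v : List Char) (c : Char) (k : Nat)
    (hu : ∀ x ∈ u, x = 'a') (hc : c ≠ 'a') (hk : u.length < k) :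
    pvAltScan (u ++ c :: v) k = some (u ++ 'a' :: v) := by
  induction u generalizing k with
  | nil =>
      cases k with
      | zero => omega
      | succ k => simp [pvAltScan, hc]
  | cons x xs ih =>
      cases k with
      | zero => omega
      | succ k =>
          have hx : x = 'a' := hu x (by simp)
          have : pvAltScan (xs ++ c :: v) k = some (xs ++ 'a' :: v) :=
            ih k (fun y hy => hu y (by simp [hy])) (by simp at hk; omega)
          simp [pvAltScan, hx, this]

-- the main equivalence, on lists of length ≥ 2
theorem pvMain (l : List Char)
    (hpre : l.reverse = l ∨ (l.getLast? ≠ some 'a' ∧ ∃ c ∈ l.take (l.length / 2), c ≠ 'a'))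
    (h1 : 1 < l.length) :
    (if pvFirstFix l ≠ (pvFirstFix l).reverse then String.ofList (pvFirstFix l)
     else String.ofList ((pvLastGo l.reverse).reverse))
    = match pvAltScan l (l.length / 2) with
      | some s => String.ofList s
      | none => String.ofList (l.dropLast ++ ['b']) := by
  obtain ⟨n, hn⟩ : ∃ n, l.length / 2 = n := ⟨_, rfl⟩
  rw [hn] at hpre ⊢
  by_cases hAll : ∀ c ∈ l.take n, c = 'a'
  · -- first half all 'a': by the palindrome, pvFirstFix l stays a palindrome,
    -- A falls through to the backward loop; B's scan returns none
    have hpal : l.reverse = l := by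
      rcases hpre with h | ⟨-, c0, hc0mem, hc0⟩
      · exact h
      · exact absurd (hAll _ hc0mem) hc0
    have hB : pvAltScan l n = none := pvAltScan_none _ _ hAll
    have htake : l.take n = List.replicate n 'a' :=
      List.eq_replicate_iff.mpr ⟨by simp; omega, hAll⟩
    have hdrop : l.drop (l.length - n) = List.replicate n 'a' := by
      have hsub : l.length - (l.length - n) = n := by omega
      have hrv : (l.drop (l.length - n)).reverse = l.reverse.take n := by
        rw [List.reverse_drop, hsub]
      rw [hpal] at hrv
      have h2 : l.drop (l.length - n) = (l.take n).reverse := by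
        rw [← List.reverse_reverse (l.drop _), hrv]
      rw [h2, htake, List.reverse_replicate]
    have hFFpal : ¬ (pvFirstFix l ≠ (pvFirstFix l).reverse) := by
      simp only [ne_eq, not_not]
      rcases Nat.even_or_odd l.length with he | ho
      · obtain ⟨j, hj⟩ := he
        have hdrop' : l.drop n = List.replicate n 'a' := by
          have h := hdrop
          rwa [show l.length - n = n from by omega] at h
        have hsplit : l = List.replicate n 'a' ++ List.replicate n 'a' := by
          conv_lhs => rw [← List.take_append_drop n l]
          rw [htake, hdrop']
        rw [pvFirstFix_all_a l (by
          intro c hc; rw [hsplit] at hc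
          rcases List.mem_append.mp hc with h | h <;> exact List.eq_of_mem_replicate h)]
        exact hpal.symm
      · obtain ⟨j, hj⟩ := ho
        have hdrop' : l.drop (n + 1) = List.replicate n 'a' := by
          have h := hdrop
          rwa [show l.length - n = n + 1 from by omega] at h
        have hlt : n < l.length := by omega
        have hmid : l.drop n = l[n] :: l.drop (n + 1) := List.drop_eq_getElem_cons hlt
        have hsplit : l = List.replicate n 'a' ++ l[n] :: List.replicate n 'a' := by
          conv_lhs => rw [← List.take_append_drop n l]
          rw [htake, hmid, hdrop']
        have hrepl : List.replicate n 'a' ++ 'a' :: List.replicate n 'a'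
            = List.replicate (n + (n + 1)) 'a' := by
          rw [List.replicate_add]; rfl
        have hFF : pvFirstFix l = List.replicate (n + (n + 1)) 'a' := by
          by_cases hma : l[n] = 'a'
          · rw [pvFirstFix_all_a l (by
              intro c hc; rw [hsplit] at hc
              rcases List.mem_append.mp hc with h | h
              · exact List.eq_of_mem_replicate h
              · rcases List.mem_cons.mp h with h | h
                · rw [h, hma]
                · exact List.eq_of_mem_replicate h)]
            rw [hsplit, hma, hrepl]
          · rw [hsplit,
              pvFirstFix_split _ _ _ (fun y hy => List.eq_of_mem_replicate hy) hma, hrepl]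
        rw [hFF, List.reverse_replicate]
    rw [if_neg hFFpal, hB]
    -- l starts (hence ends) with 'a'; the backward loop sets the last char to 'b'
    have hn1 : 1 ≤ n := by omega
    obtain ⟨rest, hL⟩ : ∃ rest, l = 'a' :: rest := by
      have hhead : l.take 1 = ['a'] := by
        have h1' : (l.take n).take 1 = List.replicate 1 'a' := by
          rw [htake, List.take_replicate]; congr 1; omega
        rwa [List.take_take, show min 1 n = 1 from by omega] at h1'
      rcases l with _ | ⟨c, rest⟩
      · simp at h1
      · exact ⟨rest, by simp at hhead; rw [hhead]⟩
    have hdl : ('a' :: rest).dropLast = rest.reverse := by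
      rw [← hL]
      conv_lhs => rw [← hpal, hL]
      simp
    have hstep : (pvLastGo l.reverse).reverse = l.dropLast ++ ['b'] := by
      rw [hpal, hL, hdl]
      simp [pvLastGo]
    rw [hstep]
  · -- a non-'a' exists in the first half: both sides change it to 'a',
    -- and the changed list is no longer a palindrome
    push_neg at hAll
    obtain ⟨c1, hc1mem, hc1⟩ := hAll
    obtain ⟨c, v, hsplit, hcne⟩ :
        ∃ c v, l = l.takeWhile (fun c => c = 'a') ++ c :: v ∧ c ≠ 'a' := by
      rcases hd : l.dropWhile (fun c => decide (c = 'a')) with _ | ⟨c, v⟩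
      · exfalso
        have hl_eq : l = l.takeWhile (fun c => decide (c = 'a')) := by
          conv_lhs => rw [← List.takeWhile_append_dropWhile (p := fun c => decide (c = 'a')) (l := l)]
          rw [hd, List.append_nil]
        have : c1 ∈ l.takeWhile (fun c => decide (c = 'a')) := by
          rw [← hl_eq]; exact List.mem_of_mem_take hc1mem
        have h3 := List.mem_takeWhile_imp this
        rw [decide_eq_true_eq] at h3
        exact hc1 h3
      · refine ⟨c, v, ?_, ?_⟩
        · conv_lhs => rw [← List.takeWhile_append_dropWhile (p := fun c => decide (c = 'a')) (l := l)]
          rw [hd]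
        · have hne2 : l.dropWhile (fun c => decide (c = 'a')) ≠ [] := by rw [hd]; simp
          have := List.head_dropWhile_not (fun c => decide (c = 'a')) hne2
          have hhc : (List.dropWhile (fun c => decide (c = 'a')) l).head hne2 = c := by
            simp [hd]
          rw [hhc] at this
          simpa using this
    set u := l.takeWhile (fun c => c = 'a') with hu
    have hua : ∀ x ∈ u, x = 'a' := by
      intro x hx
      rw [hu] at hx
      have h3 := List.mem_takeWhile_imp hx
      rw [decide_eq_true_eq] at h3
      exact h3
    have hulen : u.length < n := by
      by_contra hcon
      push_neg at hcon
      have htk : l.take n = u.take n := by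
        conv_lhs => rw [hsplit]
        rw [List.take_append, Nat.sub_eq_zero_of_le hcon]
        simp
      have : c1 ∈ u.take n := htk ▸ hc1mem
      exact hc1 (hua _ (List.mem_of_mem_take this))
    have hlenl : l.length = u.length + 1 + v.length := by
      conv_lhs => rw [hsplit]
      simp; omega
    have hA : pvFirstFix l = u ++ 'a' :: v := by
      conv_lhs => rw [hsplit]
      exact pvFirstFix_split _ _ _ hua hcne
    have hB : pvAltScan l n = some (u ++ 'a' :: v) := by
      conv_lhs => rw [hsplit]
      exact pvAltScan_split _ _ _ _ hua hcne hulen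
    have hnotpal : pvFirstFix l ≠ (pvFirstFix l).reverse := by
      rw [hA]
      intro heq
      rcases hpre with hpal | ⟨hlast, -⟩
      · -- palindrome input: the mirror position of the changed char still carries c ≠ 'a'
        obtain ⟨j', hj'⟩ : ∃ j', l.length - 1 - u.length = j' := ⟨_, rfl⟩
        have hwlen : (u ++ 'a' :: v).length = l.length := by
          simp [hlenl]; omega
        have hAget : (u ++ 'a' :: v)[u.length]? = some 'a' := by
          rw [List.getElem?_append_right (l₁ := u) (l₂ := 'a' :: v) (i := u.length) (Nat.le_refl _)]
          simp
        have hlget : l[u.length]? = some c := by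
          conv_lhs => rw [hsplit]
          rw [List.getElem?_append_right (l₁ := u) (l₂ := c :: v) (i := u.length) (Nat.le_refl _)]
          simp
        have hfar : u.length + 1 ≤ j' := by omega
        have hwj' : (u ++ 'a' :: v)[j']? = v[j' - (u.length + 1)]? := by
          rw [List.getElem?_append_right (l₁ := u) (l₂ := 'a' :: v) (i := j') (by omega)]
          obtain ⟨e, he⟩ : ∃ e, j' - u.length = e + 1 := ⟨j' - u.length - 1, by omega⟩
          rw [he]
          simp only [List.getElem?_cons_succ]
          congr 1
          omega
        have hlj' : l[j']? = v[j' - (u.length + 1)]? := by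
          conv_lhs => rw [hsplit]
          rw [List.getElem?_append_right (l₁ := u) (l₂ := c :: v) (i := j') (by omega)]
          obtain ⟨e, he⟩ : ∃ e, j' - u.length = e + 1 := ⟨j' - u.length - 1, by omega⟩
          rw [he]
          simp only [List.getElem?_cons_succ]
          congr 1
          omega
        have hmirror : l[j']? = some c := by
          rw [← hj', ← List.getElem?_reverse (by omega), hpal, hlget]
        have hwmirror : (u ++ 'a' :: v)[j']? = some 'a' := by
          have hrv := List.getElem?_reverse (l := u ++ 'a' :: v) (i := u.length) (by rw [hwlen]; omega)
          rw [← heq, hwlen, hj', hAget] at hrv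
          exact hrv.symm
        rw [hwj'] at hwmirror
        rw [hlj'] at hmirror
        rw [hmirror] at hwmirror
        exact hcne (by injection hwmirror)
      · -- input does not end in 'a': the changed list starts with 'a' but keeps the last char
        have hvne : v ≠ [] := by
          intro hv
          rw [hv] at hlenl
          simp at hlenl
          omega
        rcases v.eq_nil_or_concat with hv | ⟨v₀, x, hv⟩
        · exact hvne hv
        have hlastl : l.getLast? = some x := by
          rw [hsplit, hv, show u ++ c :: v₀.concat x = (u ++ c :: v₀) ++ [x] by simp [List.concat_eq_append],
              List.getLast?_concat]
        have hlastw : (u ++ 'a' :: v).getLast? = some x := by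
          rw [hv, show u ++ 'a' :: v₀.concat x = (u ++ 'a' :: v₀) ++ [x] by simp [List.concat_eq_append],
              List.getLast?_concat]
        have hhead : (u ++ 'a' :: v).head? = some 'a' := by
          cases hu2 : u with
          | nil => simp
          | cons y ys =>
              have hy : y = 'a' := hua y (by rw [hu2]; simp)
              simp [hu2, hy]
        have h5 : (u ++ 'a' :: v).getLast? = some 'a' := by
          rw [← List.head?_reverse, ← heq, hhead]
        rw [hlastw] at h5
        exact hlast (hlastl.trans h5)
    rw [hA] at hnotpal
    rw [if_pos (hA ▸ hnotpal), hA, hB]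

-- ===== VERDICT (by name: the statement is the Claim_ definition above) =====
theorem breakPalindrome_spec : Claim_equal_breakPalindrome := by
  intro p _ hpal
  unfold Pre_breakPalindrome at hpal
  unfold Spec_breakPalindrome breakPalindrome breakPalindrome_alt
  rcases Nat.lt_or_ge 1 p.toList.length with hgt | hle
  · rw [if_neg (show ¬ p.toList.length = 1 by omega),
        if_neg (show ¬ p.toList.length ≤ 1 by omega)]
    exact pvMain p.toList hpal hgt
  · rcases hcase : p.toList with _ | ⟨c, cs⟩
    · simp [pvFirstFix, pvLastGo]
    · rcases cs with _ | ⟨d, ds⟩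
      · simp
      · exfalso
        rw [hcase] at hle
        simp only [List.length_cons] at hle
        omega
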